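-- pv_equiv track=rewrite | github.com/24SVEN/leetcode_contests | scrap.py | add_ones_and_zeroes
-- ===== SOURCE A (Python) =====
-- def add_ones_and_zeroes(li,idx):
--     swap = 1
--     suffix = []
--     for i in range(len(li)-1-idx):
--         if swap == 1:
--             suffix.append('0')
--         else:
--             suffix.append('1')
--         swap *= -1
--
--     return li[:idx+1] + suffix
-- ===== SOURCE B (Python) =====
-- def add_ones_and_zeroes(li, idx):
--     n = max(0, len(li) - 1 - idx)
--     suffix = (['0', '1'] * ((n + 1) // 2))[:n]
--     return li[:idx + 1] + suffix
-- ===== Notes on version B (the rewrite author's own statement) =====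
-- stated objective: idiomatic
-- what changed: Replaces the per-element append loop with a sign-flipping toggle by a closed-form repeat-and-slice construction of the alternating suffix.
import Mathlib
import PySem

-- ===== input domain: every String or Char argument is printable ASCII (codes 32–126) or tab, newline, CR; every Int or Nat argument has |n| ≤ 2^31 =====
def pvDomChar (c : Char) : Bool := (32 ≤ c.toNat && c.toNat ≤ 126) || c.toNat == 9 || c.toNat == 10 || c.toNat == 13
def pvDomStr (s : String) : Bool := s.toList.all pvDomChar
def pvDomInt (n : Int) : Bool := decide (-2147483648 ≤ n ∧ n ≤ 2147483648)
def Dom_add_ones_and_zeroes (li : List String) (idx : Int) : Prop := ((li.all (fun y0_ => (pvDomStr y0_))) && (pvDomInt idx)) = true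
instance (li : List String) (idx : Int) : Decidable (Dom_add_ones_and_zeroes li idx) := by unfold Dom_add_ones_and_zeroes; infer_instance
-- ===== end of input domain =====

-- B replaces A's append loop with a swap toggle by a closed-form repeat-and-slice
-- construction of the alternating suffix (idiomatic; same cost).

-- ===== PORT A =====
-- swap/suffix loop over range(len(li)-1-idx), then li[:idx+1] + suffix
def add_ones_and_zeroes (li : List String) (idx : Int) : List String :=
  PySem.List.slice li none (some (idx + 1)) ++
    ((PySem.List.pyRange 0 ((li.length : Int) - 1 - idx) 1).foldl
      (fun (st : Int × List String) _ =>
        (st.1 * (-1), st.2 ++ [if st.1 == 1 then "0" else "1"]))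
      (1, [])).2

-- ===== PORT B =====
-- n = max(0, len(li)-1-idx); suffix = (['0','1'] * ((n+1)//2))[:n]
def add_ones_and_zeroes_alt (li : List String) (idx : Int) : List String :=
  let n : Int := max 0 ((li.length : Int) - 1 - idx)
  PySem.List.slice li none (some (idx + 1)) ++
    PySem.List.slice
      ((List.replicate (PySem.Int.floordiv (n + 1) 2).toNat ["0", "1"]).flatten)
      none (some n)

-- ===== PRECONDITION & SPEC =====
def Spec_add_ones_and_zeroes (li : List String) (idx : Int) (out : List String) : Prop := out = add_ones_and_zeroes_alt li idx
instance (li : List String) (idx : Int) (out : List String) : Decidable (Spec_add_ones_and_zeroes li idx out) := by unfold Spec_add_ones_and_zeroes; infer_instance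

-- ===== CLAIM (what is proved, stated in full; the proofs are below) =====
def Claim_equal_add_ones_and_zeroes : Prop := ∀ (li : List String) (idx : Int), Dom_add_ones_and_zeroes li idx → Spec_add_ones_and_zeroes li idx (add_ones_and_zeroes li idx)

-- ===== LEMMAS AND PROOFS =====

-- the alternating pattern of length n starting with '0' when b = true
def pvPat : Nat → Bool → List String
  | 0, _ => []
  | n + 1, b => (if b then "0" else "1") :: pvPat n (!b)

theorem pvPat_loop (l : List Int) (s : Int) (acc : List String) (hs : s = 1 ∨ s = -1) :
    (l.foldl
      (fun (st : Int × List String) _ =>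
        (st.1 * (-1), st.2 ++ [if st.1 == 1 then "0" else "1"]))
      (s, acc)).2 = acc ++ pvPat l.length (s == 1) := by
  induction l generalizing s acc with
  | nil => simp [pvPat]
  | cons x t ih =>
    rcases hs with rfl | rfl
    · rw [List.foldl_cons, ih (1 * -1) _ (by norm_num)]
      simp [pvPat]
    · rw [List.foldl_cons, ih (-1 * -1) _ (by norm_num)]
      simp [pvPat]

theorem pvPat_pair (k : Nat) :
    (List.replicate k (["0", "1"] : List String)).flatten = pvPat (2 * k) true := by
  induction k with
  | zero => simp [pvPat]
  | succ k ih =>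
    have h2 : 2 * (k + 1) = (2 * k) + 1 + 1 := by omega
    rw [h2]
    simp [List.replicate_succ, pvPat, ih]

theorem pvPat_take (n : Nat) : ∀ (m : Nat) (b : Bool), n ≤ m →
    (pvPat m b).take n = pvPat n b := by
  induction n with
  | zero => intro m b _; simp [pvPat]
  | succ n ih =>
    intro m b h
    obtain ⟨m', rfl⟩ : ∃ m', m = m' + 1 := ⟨m - 1, by omega⟩
    simp [pvPat, List.take_succ_cons, ih m' (!b) (by omega)]

-- ===== VERDICT (by name: the statement is the Claim_ definition above) =====
theorem add_ones_and_zeroes_spec : Claim_equal_add_ones_and_zeroes := by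
  intro li idx _
  unfold Spec_add_ones_and_zeroes add_ones_and_zeroes add_ones_and_zeroes_alt
  simp only []
  congr 1
  -- both suffixes equal pvPat n true, n = (len-1-idx).toNat
  set d : Int := (li.length : Int) - 1 - idx with hd
  set m : Nat := d.toNat with hm
  have hmax : max 0 d = (m : Nat) := by omega
  rw [pvPat_loop _ 1 [] (Or.inl rfl)]
  rw [PySem.List.length_pyRange_one]
  rw [hmax]
  have hfd : PySem.Int.floordiv ((m : Int) + 1) 2 = (((m + 1) / 2 : Nat) : Int) := by
    exact_mod_cast PySem.Int.floordiv_natCast (m + 1) 2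
  rw [hfd]
  rw [PySem.List.slice_to_natCast]
  simp only [Int.toNat_natCast, Int.sub_zero]
  rw [pvPat_pair, pvPat_take m (2 * ((m + 1) / 2)) true (by omega)]
  simp [hm]
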